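-- pv_equiv track=rewrite | github.com/aliaa039/Dynamic_Pricing_Justification | NLP/src/cv_analysis/condition_evaluator.py | _determine_overall_condition
-- ===== SOURCE A (Python) =====
-- from typing import Dict, List
--
-- def _determine_overall_condition(conditions: List[str]) -> str:
--     """
--     Determine overall condition from multiple view conditions.
--     Uses worst-case scenario (most damaged condition wins).
--     """
--     if not conditions:
--         return 'good'
--
--     # Priority order (worst to best)
--     priority = [
--         'broken', 'damaged', 'poor', 'fair',
--         'good', 'very good', 'excellent'
--     ]
--
--     # Find worst condition
--     for level in priority:
--         if level in conditions:
--             return level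
--
--     return 'good'
-- ===== SOURCE B (Python) =====
-- from typing import Dict, List
--
-- def _determine_overall_condition(conditions: List[str]) -> str:
--     priority = [
--         'broken', 'damaged', 'poor', 'fair',
--         'good', 'very good', 'excellent'
--     ]
--     rank = {level: i for i, level in enumerate(priority)}
--     best = None
--     for c in conditions:
--         i = rank.get(c)
--         if i is not None and (best is None or i < best):
--             best = i
--     return priority[best] if best is not None else 'good'
-- ===== Notes on version B (the rewrite author's own statement) =====
-- stated objective: alternative
-- what changed: B scans the input list once keeping the minimum priority rank (via a dict built from enumerate), instead of A's scan over the fixed priority list with a list-membership test into conditions for each level.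
import Mathlib
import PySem

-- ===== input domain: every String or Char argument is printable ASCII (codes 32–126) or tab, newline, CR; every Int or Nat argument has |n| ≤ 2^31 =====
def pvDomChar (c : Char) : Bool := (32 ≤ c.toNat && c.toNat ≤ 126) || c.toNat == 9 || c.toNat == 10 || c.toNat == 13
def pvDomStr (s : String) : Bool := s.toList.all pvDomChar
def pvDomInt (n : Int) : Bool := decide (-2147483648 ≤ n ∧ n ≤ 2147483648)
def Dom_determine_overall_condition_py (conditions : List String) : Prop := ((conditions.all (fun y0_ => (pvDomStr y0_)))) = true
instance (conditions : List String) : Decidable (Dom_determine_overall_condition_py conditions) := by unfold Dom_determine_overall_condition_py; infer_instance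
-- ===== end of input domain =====

-- B replaces A's scan over the fixed priority list (membership test per level) by a single
-- pass over `conditions` keeping the minimum priority rank from a dict; same value everywhere.

-- ===== PORT A =====
def pvPriorityA : List String :=
  ["broken", "damaged", "poor", "fair", "good", "very good", "excellent"]

def determine_overall_condition_py_loop (conditions : List String) : List String → String
  | [] => "good"
  | level :: rest =>
      if conditions.contains level then level
      else determine_overall_condition_py_loop conditions rest

def determine_overall_condition_py (conditions : List String) : String :=
  if conditions.isEmpty then "good"
  else determine_overall_condition_py_loop conditions pvPriorityA

-- ===== PORT B =====
def pvPriorityB : List String :=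
  ["broken", "damaged", "poor", "fair", "good", "very good", "excellent"]

def pvRank : PySem.Dict String Int :=
  (PySem.List.enumerate pvPriorityB).foldl (fun d p => d.insert p.2 p.1) PySem.Dict.empty

def pvStep (best : Option Int) (c : String) : Option Int :=
  match pvRank.get? c with
  | none => best
  | some i =>
    match best with
    | none => some i
    | some b => if i < b then some i else best

def determine_overall_condition_py_alt (conditions : List String) : String :=
  match conditions.foldl pvStep none with
  | some b => (PySem.List.pyGet? pvPriorityB b).getD "good"  -- priority[best]; index is always valid, getD only for totality
  | none => "good"

-- ===== PRECONDITION & SPEC =====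
def Spec_determine_overall_condition_py (conditions : List String) (out : String) : Prop := out = determine_overall_condition_py_alt conditions
instance (conditions : List String) (out : String) : Decidable (Spec_determine_overall_condition_py conditions out) := by unfold Spec_determine_overall_condition_py; infer_instance

-- ===== CLAIM (what is proved, stated in full; the proofs are below) =====
def Claim_equal_determine_overall_condition_py : Prop := ∀ (conditions : List String), Dom_determine_overall_condition_py conditions → Spec_determine_overall_condition_py conditions (determine_overall_condition_py conditions)

-- ===== LEMMAS AND PROOFS =====

-- the rank dict, spelled out
theorem pvRank_eq : pvRank = PySem.Dict.mk
    [("broken", 0), ("damaged", 1), ("poor", 2), ("fair", 3),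
     ("good", 4), ("very good", 5), ("excellent", 6)] := by decide

-- option-minimum combinator
def pvOmin (a b : Option Int) : Option Int :=
  match a, b with
  | none, b => b
  | some x, none => some x
  | some x, some y => some (min x y)

theorem pvStep_eq_omin (best : Option Int) (c : String) :
    pvStep best c = pvOmin best (pvRank.get? c) := by
  unfold pvStep pvOmin
  cases pvRank.get? c with
  | none => cases best <;> rfl
  | some i =>
      cases best with
      | none => rfl
      | some b =>
          simp only [Int.min_def]
          split_ifs <;> exact congrArg some (by omega)

theorem pvOmin_assoc (a b c : Option Int) :
    pvOmin (pvOmin a b) c = pvOmin a (pvOmin b c) := by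
  cases a <;> cases b <;> cases c <;> simp [pvOmin, min_assoc]

-- hoisting the accumulator out of the fold
theorem foldl_step_hoist (cs : List String) (best : Option Int) :
    cs.foldl pvStep best = pvOmin best (cs.foldl pvStep none) := by
  induction cs generalizing best with
  | nil => cases best <;> rfl
  | cons c t ih =>
      simp only [List.foldl_cons]
      rw [ih (pvStep best c), ih (pvStep none c),
          pvStep_eq_omin, pvStep_eq_omin none c, pvOmin_assoc]
      rfl

theorem foldl_step_cons (c : String) (t : List String) :
    (c :: t).foldl pvStep none = pvOmin (pvRank.get? c) (t.foldl pvStep none) := by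
  simp only [List.foldl_cons]
  rw [foldl_step_hoist, pvStep_eq_omin]
  rfl

-- soundness: the fold's result is the rank of some element of cs
theorem fold_sound (cs : List String) (i : Int)
    (h : cs.foldl pvStep none = some i) :
    ∃ c ∈ cs, pvRank.get? c = some i := by
  induction cs with
  | nil => simp at h
  | cons c t ih =>
      rw [foldl_step_cons] at h
      cases hc : pvRank.get? c with
      | none =>
          rw [hc] at h
          simp only [pvOmin] at h
          obtain ⟨d, hd, hrk⟩ := ih h
          exact ⟨d, List.mem_cons_of_mem _ hd, hrk⟩
      | some a =>
          rw [hc] at h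
          cases ht : t.foldl pvStep none with
          | none =>
              rw [ht] at h
              simp only [pvOmin] at h
              exact ⟨c, List.mem_cons_self, by rw [hc, h]⟩
          | some b =>
              rw [ht] at h
              simp only [pvOmin, Option.some.injEq] at h
              rcases min_choice a b with hm | hm
              · exact ⟨c, List.mem_cons_self, by rw [hc, ← h, hm]⟩
              · obtain ⟨d, hd, hrk⟩ := ih (by rw [ht, ← h, hm])
                exact ⟨d, List.mem_cons_of_mem _ hd, hrk⟩

-- minimality: any ranked member of cs bounds the fold's result
theorem fold_min (cs : List String) (c : String) (j : Int)
    (hmem : c ∈ cs) (hrk : pvRank.get? c = some j) :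
    ∃ i, cs.foldl pvStep none = some i ∧ i ≤ j := by
  induction cs with
  | nil => simp at hmem
  | cons d t ih =>
      rw [foldl_step_cons]
      rcases List.mem_cons.mp hmem with rfl | hmem'
      · rw [hrk]
        cases ht : t.foldl pvStep none with
        | none => exact ⟨j, rfl, le_refl j⟩
        | some b => exact ⟨min j b, rfl, min_le_left j b⟩
      · obtain ⟨i, hi, hij⟩ := ih hmem'
        rw [hi]
        cases hd : pvRank.get? d with
        | none => exact ⟨i, rfl, hij⟩
        | some a => exact ⟨min a i, rfl, le_trans (min_le_right a i) hij⟩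

-- a level strictly better-ranked than the fold's result cannot be in cs
theorem fold_notmem (cs : List String) (i : Int) (l : String) (r : Int)
    (hrk : pvRank.get? l = some r)
    (hf : cs.foldl pvStep none = some i) (hlt : r < i) : l ∉ cs := by
  intro hmem
  obtain ⟨i', hi', hle⟩ := fold_min cs l r hmem hrk
  rw [hf] at hi'
  injection hi' with h
  omega

-- concrete ranks and shape of a successful rank lookup
theorem rk_broken : pvRank.get? "broken" = some 0 := by decide
theorem rk_damaged : pvRank.get? "damaged" = some 1 := by decide
theorem rk_poor : pvRank.get? "poor" = some 2 := by decide
theorem rk_fair : pvRank.get? "fair" = some 3 := by decide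
theorem rk_good : pvRank.get? "good" = some 4 := by decide
theorem rk_verygood : pvRank.get? "very good" = some 5 := by decide
theorem rk_excellent : pvRank.get? "excellent" = some 6 := by decide


theorem rank_shape (c : String) (i : Int) (h : pvRank.get? c = some i) :
    0 ≤ i ∧ i < 7 ∧ PySem.List.pyGet? pvPriorityB i = some c := by
  by_cases h0 : c = "broken"
  · subst h0; rw [rk_broken] at h; injection h with hi; subst hi; decide
  by_cases h1 : c = "damaged"
  · subst h1; rw [rk_damaged] at h; injection h with hi; subst hi; decide
  by_cases h2 : c = "poor"
  · subst h2; rw [rk_poor] at h; injection h with hi; subst hi; decide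
  by_cases h3 : c = "fair"
  · subst h3; rw [rk_fair] at h; injection h with hi; subst hi; decide
  by_cases h4 : c = "good"
  · subst h4; rw [rk_good] at h; injection h with hi; subst hi; decide
  by_cases h5 : c = "very good"
  · subst h5; rw [rk_verygood] at h; injection h with hi; subst hi; decide
  by_cases h6 : c = "excellent"
  · subst h6; rw [rk_excellent] at h; injection h with hi; subst hi; decide
  · exfalso
    rw [pvRank_eq] at h
    simp [PySem.Dict.get?_mk_cons,
      show ("broken" == c) = false by simp [Ne.symm h0],
      show ("damaged" == c) = false by simp [Ne.symm h1],
      show ("poor" == c) = false by simp [Ne.symm h2],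
      show ("fair" == c) = false by simp [Ne.symm h3],
      show ("good" == c) = false by simp [Ne.symm h4],
      show ("very good" == c) = false by simp [Ne.symm h5],
      show ("excellent" == c) = false by simp [Ne.symm h6]] at h
    simp [PySem.Dict.get?] at h

theorem notmem_of_fold_none (cs : List String) (l : String) (r : Int)
    (hrk : pvRank.get? l = some r)
    (hf : cs.foldl pvStep none = none) : l ∉ cs := by
  intro hmem
  obtain ⟨i, hi, _⟩ := fold_min cs l r hmem hrk
  rw [hf] at hi
  simp at hi

-- ===== VERDICT (by name: the statement is the Claim_ definition above) =====
theorem determine_overall_condition_py_spec : Claim_equal_determine_overall_condition_py := by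
  intro cs _
  unfold Spec_determine_overall_condition_py
  unfold determine_overall_condition_py determine_overall_condition_py_alt
  cases hf : cs.foldl pvStep none with
  | none =>
      have c0 := notmem_of_fold_none cs _ _ rk_broken hf
      have c1 := notmem_of_fold_none cs _ _ rk_damaged hf
      have c2 := notmem_of_fold_none cs _ _ rk_poor hf
      have c3 := notmem_of_fold_none cs _ _ rk_fair hf
      have c4 := notmem_of_fold_none cs _ _ rk_good hf
      have c5 := notmem_of_fold_none cs _ _ rk_verygood hf
      have c6 := notmem_of_fold_none cs _ _ rk_excellent hf
      by_cases he : cs.isEmpty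
      · simp [he]
      · simp [he, pvPriorityA, determine_overall_condition_py_loop,
          c0, c1, c2, c3, c4, c5, c6]
  | some i =>
      obtain ⟨c, hmem, hrk⟩ := fold_sound cs i hf
      obtain ⟨hge, hlt, hget⟩ := rank_shape c i hrk
      have hne : cs.isEmpty = false := by
        cases cs
        · simp at hmem
        · rfl
      simp only [hne, Bool.false_eq_true, if_false]
      interval_cases i
      · -- i = 0, c = "broken"
        have hc : c = "broken" := by
          have : some "broken" = some c := by rw [← hget]; rfl
          injection this with h; exact h.symm
        subst hc
        simp [pvPriorityA, determine_overall_condition_py_loop, hmem, pvPriorityB]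
      · have hc : c = "damaged" := by
          have : some "damaged" = some c := by rw [← hget]; rfl
          injection this with h; exact h.symm
        subst hc
        simp [pvPriorityA, determine_overall_condition_py_loop, hmem, pvPriorityB,
          fold_notmem cs _ _ _ rk_broken hf (by omega)]
      · have hc : c = "poor" := by
          have : some "poor" = some c := by rw [← hget]; rfl
          injection this with h; exact h.symm
        subst hc
        simp [pvPriorityA, determine_overall_condition_py_loop, hmem, pvPriorityB,
          fold_notmem cs _ _ _ rk_broken hf (by omega),
          fold_notmem cs _ _ _ rk_damaged hf (by omega)]
      · have hc : c = "fair" := by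
          have : some "fair" = some c := by rw [← hget]; rfl
          injection this with h; exact h.symm
        subst hc
        simp [pvPriorityA, determine_overall_condition_py_loop, hmem, pvPriorityB,
          fold_notmem cs _ _ _ rk_broken hf (by omega),
          fold_notmem cs _ _ _ rk_damaged hf (by omega),
          fold_notmem cs _ _ _ rk_poor hf (by omega)]
      · have hc : c = "good" := by
          have : some "good" = some c := by rw [← hget]; rfl
          injection this with h; exact h.symm
        subst hc
        simp [pvPriorityA, determine_overall_condition_py_loop, hmem, pvPriorityB,
          fold_notmem cs _ _ _ rk_broken hf (by omega),
          fold_notmem cs _ _ _ rk_damaged hf (by omega),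
          fold_notmem cs _ _ _ rk_poor hf (by omega),
          fold_notmem cs _ _ _ rk_fair hf (by omega)]
      · have hc : c = "very good" := by
          have : some "very good" = some c := by rw [← hget]; rfl
          injection this with h; exact h.symm
        subst hc
        simp [pvPriorityA, determine_overall_condition_py_loop, hmem, pvPriorityB,
          fold_notmem cs _ _ _ rk_broken hf (by omega),
          fold_notmem cs _ _ _ rk_damaged hf (by omega),
          fold_notmem cs _ _ _ rk_poor hf (by omega),
          fold_notmem cs _ _ _ rk_fair hf (by omega),
          fold_notmem cs _ _ _ rk_good hf (by omega)]
      · have hc : c = "excellent" := by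
          have : some "excellent" = some c := by rw [← hget]; rfl
          injection this with h; exact h.symm
        subst hc
        simp [pvPriorityA, determine_overall_condition_py_loop, hmem, pvPriorityB,
          fold_notmem cs _ _ _ rk_broken hf (by omega),
          fold_notmem cs _ _ _ rk_damaged hf (by omega),
          fold_notmem cs _ _ _ rk_poor hf (by omega),
          fold_notmem cs _ _ _ rk_fair hf (by omega),
          fold_notmem cs _ _ _ rk_good hf (by omega),
          fold_notmem cs _ _ _ rk_verygood hf (by omega)]
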